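-- pv_equiv track=rewrite | github.com/iz05/ai | crosswords/CrosswordsREDv4.py | helper_recur
-- ===== SOURCE A (Python) =====
-- def helper_recur(word, index):
--     ret = set()
--     if index == len(word) - 1:
--         ret.add("-")
--         ret.add(word[-1])
--         return ret
--     temp = helper_recur(word, index + 1)
--     for thing in temp:
--         ret.add(word[index] + thing)
--         ret.add("-" + thing)
--     return ret
-- ===== SOURCE B (Python) =====
-- def helper_recur(word, index):
--     ret = {"-", word[-1]}
--     for i in reversed(range(index, len(word) - 1)):
--         c = word[i]
--         ret = {choice + rest for rest in ret for choice in (c, "-")}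
--     return ret
-- ===== Notes on version B (the rewrite author's own statement) =====
-- stated objective: idiomatic
-- what changed: Replaces the recursion on index with an iterative right-to-left loop that seeds the set from the last character and repeatedly rebuilds it with a set comprehension prefixing each string with the current character or '-'.
import Mathlib
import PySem

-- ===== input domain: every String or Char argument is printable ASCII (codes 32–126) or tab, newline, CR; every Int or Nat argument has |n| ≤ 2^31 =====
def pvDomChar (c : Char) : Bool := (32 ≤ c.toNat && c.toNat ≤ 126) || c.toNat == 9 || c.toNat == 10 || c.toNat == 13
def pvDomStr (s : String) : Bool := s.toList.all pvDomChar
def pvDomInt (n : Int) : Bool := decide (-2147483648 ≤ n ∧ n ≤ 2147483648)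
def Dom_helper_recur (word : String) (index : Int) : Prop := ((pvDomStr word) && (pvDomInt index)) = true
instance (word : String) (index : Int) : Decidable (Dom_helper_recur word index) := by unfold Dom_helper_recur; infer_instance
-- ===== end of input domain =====

-- B replaces A's recursion on index with an iterative right-to-left loop over the index range
-- (seed set from the last character, then repeatedly prefix with char-or-dash); same cost, plainer shape.

-- ===== PORT A =====
-- Python's base case fires when index == len(word)-1; for index > len(word)-1 the Python
-- recursion never returns (RecursionError), which is outside Pre_ — the '≤' guard only makes
-- the port total there.  The 'none' branches are Python IndexError, also outside Pre_.
def helper_recur_go (cs : List Char) (k : Nat) (index : Int) : List String :=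
  if (cs.length : Int) - 1 ≤ index then
    match PySem.List.pyGet? cs (-1) with
    | some c => PySem.Set.add (PySem.Set.add PySem.Set.empty "-") (String.ofList [c])
    | none   => []
  else
    match k with
    | 0 => []  -- fuel exhausted: never reached when k = ((len cs) - 1 - index).toNat
    | Nat.succ k' =>
      let temp := helper_recur_go cs k' (index + 1)
      temp.foldl (fun ret thing =>
        match PySem.List.pyGet? cs index with
        | some c => PySem.Set.add (PySem.Set.add ret (String.ofList [c] ++ thing)) ("-" ++ thing)
        | none   => ret) PySem.Set.empty

def helper_recur (word : String) (index : Int) : List String :=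
  helper_recur_go word.toList (((word.toList.length : Int) - 1 - index).toNat) index

-- ===== PORT B =====
def helper_recur_alt (word : String) (index : Int) : List String :=
  let cs := word.toList
  let init : List String :=
    match PySem.List.pyGet? cs (-1) with
    | some c => PySem.Set.ofList ["-", String.ofList [c]]   -- ret = {"-", word[-1]}
    | none   => []                                      -- IndexError, outside Pre_
  ((PySem.List.pyRange index ((cs.length : Int) - 1) 1).reverse).foldl
    (fun ret i =>
      match PySem.List.pyGet? cs i with
      | some c => PySem.Set.ofList
          (ret.flatMap (fun rest => [String.ofList [c] ++ rest, "-" ++ rest]))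
      | none   => ret)                                  -- IndexError, outside Pre_
    init

-- ===== PRECONDITION & SPEC =====
-- Pre_: exactly the inputs where Python A returns (elsewhere it hits IndexError or unbounded recursion).
def Pre_helper_recur (word : String) (index : Int) : Prop :=
  word ≠ "" ∧ -(word.toList.length : Int) ≤ index ∧ index ≤ (word.toList.length : Int) - 1
instance (word : String) (index : Int) : Decidable (Pre_helper_recur word index) := by
  unfold Pre_helper_recur; infer_instance

def pvWitness_helper_recur : String × Int := ("ab", 0)

def Spec_helper_recur (word : String) (index : Int) (out : List String) : Prop := out = helper_recur_alt word index
instance (word : String) (index : Int) (out : List String) : Decidable (Spec_helper_recur word index out) := by unfold Spec_helper_recur; infer_instance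

-- ===== CLAIM (what is proved, stated in full; the proofs are below) =====
def Claim_equal_helper_recur : Prop := ∀ (word : String) (index : Int), Dom_helper_recur word index → Pre_helper_recur word index → Spec_helper_recur word index (helper_recur word index)

-- ===== LEMMAS AND PROOFS =====

-- folding Set.add over a flatMap = folding the two adds group by group
theorem setAdd_foldl_flatMap {α β : Type} [BEq α] (g : β → List α) (l : List β) (acc : List α) :
    List.foldl PySem.Set.add acc (l.flatMap g)
      = l.foldl (fun r t => List.foldl PySem.Set.add r (g t)) acc := by
  induction l generalizing acc with
  | nil => rfl
  | cons x xs ih => simp [List.flatMap_cons, List.foldl_append, ih]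

-- the body of B's fold, named for the induction
def altStep (cs : List Char) (ret : List String) (i : Int) : List String :=
  match PySem.List.pyGet? cs i with
  | some c => PySem.Set.ofList (ret.flatMap (fun rest => [String.ofList [c] ++ rest, "-" ++ rest]))
  | none   => ret

theorem alt_eq_foldl (word : String) (index : Int) :
    helper_recur_alt word index
      = ((PySem.List.pyRange index ((word.toList.length : Int) - 1) 1).reverse).foldl
          (altStep word.toList)
          (match PySem.List.pyGet? word.toList (-1) with
           | some c => PySem.Set.ofList ["-", String.ofList [c]]
           | none   => []) := by
  rfl

theorem go_eq_alt (cs : List Char) (hcs : cs ≠ []) :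
    ∀ (k : Nat) (index : Int), -(cs.length : Int) ≤ index → index ≤ (cs.length : Int) - 1 →
      (((cs.length : Int) - 1 - index)).toNat = k →
      helper_recur_go cs k index
        = ((PySem.List.pyRange index ((cs.length : Int) - 1) 1).reverse).foldl
            (altStep cs)
            (match PySem.List.pyGet? cs (-1) with
             | some c => PySem.Set.ofList ["-", String.ofList [c]]
             | none   => []) := by
  intro k
  induction k with
  | zero =>
      intro index h1 h2 hk
      have hix : ((cs.length : Int) - 1) = index := by omega
      rw [helper_recur_go, if_pos (by omega)]
      rw [PySem.List.pyRange_one_eq_nil (by omega)]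
      obtain ⟨c, hc⟩ : ∃ c, PySem.List.pyGet? cs (-1) = some c := by
        rcases Option.eq_none_or_eq_some (PySem.List.pyGet? cs (-1)) with h | h
        · exfalso
          rw [PySem.List.pyGet?_eq_none_iff] at h
          apply h
          unfold PySem.Raise.InRange
          have : 0 < cs.length := List.length_pos_of_ne_nil hcs
          omega
        · exact h
      simp [hc]
      rfl
  | succ k ih =>
      intro index h1 h2 hk
      have hlt : index < (cs.length : Int) - 1 := by omega
      obtain ⟨c, hc⟩ : ∃ c, PySem.List.pyGet? cs index = some c := by
        rcases Option.eq_none_or_eq_some (PySem.List.pyGet? cs index) with h | h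
        · exfalso
          rw [PySem.List.pyGet?_eq_none_iff] at h
          apply h
          unfold PySem.Raise.InRange
          omega
        · exact h
      have hrec := ih (index + 1) (by omega) (by omega) (by omega)
      rw [helper_recur_go, if_neg (by omega)]
      rw [PySem.List.pyRange_one_cons hlt, List.reverse_cons, List.foldl_append]
      rw [← hrec]
      simp only [List.foldl, altStep, hc]
      -- A's inner for-loop over temp equals B's comprehension-then-set
      rw [PySem.Set.ofList_eq_foldl,
          setAdd_foldl_flatMap (fun rest => [String.ofList [c] ++ rest, "-" ++ rest])]
      rfl

-- ===== VERDICT (by name: the statement is the Claim_ definition above) =====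
theorem helper_recur_spec : Claim_equal_helper_recur := by
  intro word index _hdom hpre
  obtain ⟨hne, h1, h2⟩ := hpre
  have hcs : word.toList ≠ [] := by
    intro h
    apply hne
    have := congrArg String.ofList h
    rwa [String.ofList_toList] at this
  unfold Spec_helper_recur
  rw [alt_eq_foldl, helper_recur]
  exact go_eq_alt word.toList hcs (((word.toList.length : Int) - 1 - index)).toNat index h1 h2 rfl
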